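-- pv_equiv track=rewrite | github.com/aristath/ergon.studio | ergon_studio/proxy/grouped_workflow_executor.py | _agent_instance_label
-- ===== SOURCE A (Python) =====
-- def _agent_instance_label(group: tuple[str, ...], agent_index: int) -> str:
--     agent_id = group[agent_index]
--     total_instances = sum(1 for candidate in group if candidate == agent_id)
--     if total_instances <= 1:
--         return agent_id
--     current_instance = sum(
--         1 for candidate in group[: agent_index + 1] if candidate == agent_id
--     )
--     return f"{agent_id}[{current_instance}]"
-- ===== SOURCE B (Python) =====
-- def _agent_instance_label(group: tuple[str, ...], agent_index: int) -> str:
--     agent_id = group[agent_index]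
--     idx = agent_index % len(group)
--     seen = {}
--     current = 0
--     for i, cid in enumerate(group):
--         seen[cid] = seen.get(cid, 0) + 1
--         if i == idx:
--             current = seen[cid]
--     if seen[agent_id] <= 1:
--         return agent_id
--     return f"{agent_id}[{current}]"
-- ===== Notes on version B (the rewrite author's own statement) =====
-- stated objective: alternative
-- what changed: Replaces A's two counting scans (whole-tuple count plus a prefix-slice recount) with a single enumerate pass over a running-count dictionary: each element bumps its counter, the counter value at the normalized index is the instance ordinal, and the final counter of agent_id is the total.
-- intended difference: On agent_index == -1 when the last element occurs more than once, A's prefix slice group[:agent_index+1] == group[:0] is empty so it returns the accidental label 'id[0]', while B returns the intended 1-based ordinal 'id[total]' consistent with A's own behaviour at every other negative index. — e.g. on _agent_instance_label(["x", "x"], -1): A returns "x[0]", B returns "x[2]"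
import Mathlib
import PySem

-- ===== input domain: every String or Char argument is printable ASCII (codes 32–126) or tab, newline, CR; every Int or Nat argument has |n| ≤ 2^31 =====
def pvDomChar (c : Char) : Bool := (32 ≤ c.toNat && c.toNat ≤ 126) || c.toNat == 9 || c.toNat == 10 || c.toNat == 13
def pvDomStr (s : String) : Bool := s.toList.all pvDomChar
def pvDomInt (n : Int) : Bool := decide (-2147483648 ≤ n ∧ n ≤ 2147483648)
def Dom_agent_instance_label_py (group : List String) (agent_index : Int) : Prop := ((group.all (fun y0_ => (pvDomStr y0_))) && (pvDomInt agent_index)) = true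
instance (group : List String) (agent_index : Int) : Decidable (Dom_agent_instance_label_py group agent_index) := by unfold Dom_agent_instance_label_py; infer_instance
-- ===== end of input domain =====

-- B replaces A's two counting scans with ONE enumerate pass over a running-count
-- dictionary (ordinal read off at the normalized index, total read off at the end);
-- on agent_index = -1 with a duplicated last element B returns the intended ordinal
-- where A's empty prefix slice yields 'id[0]' (objective: alternative, same cost).

-- ===== PORT A =====
def agent_instance_label_py (group : List String) (agent_index : Int) : String :=
  match PySem.List.pyGet? group agent_index with
  | none => ""  -- IndexError, excluded by Pre_
  | some agent_id =>
    let total_instances : Int :=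
      group.foldl (fun acc candidate => if candidate == agent_id then acc + 1 else acc) 0
    if total_instances ≤ 1 then agent_id
    else
      let current_instance : Int :=
        (PySem.List.slice group none (some (agent_index + 1))).foldl
          (fun acc candidate => if candidate == agent_id then acc + 1 else acc) 0
      agent_id ++ "[" ++ PySem.Int.toStr current_instance ++ "]"

-- ===== PORT B =====
-- the loop body of Source B: bump the running count of the current id, and record the
-- bumped count as `current` when the enumerate index hits the normalized index.
def pvStepB (idx : Int) (st : PySem.Dict String Int × Int) (p : Int × String) :
    PySem.Dict String Int × Int :=
  let seen := st.1.insert p.2 (st.1.getD p.2 0 + 1)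
  (seen, if p.1 == idx then seen.getD p.2 0 else st.2)

def agent_instance_label_py_alt (group : List String) (agent_index : Int) : String :=
  match PySem.List.pyGet? group agent_index with
  | none => ""  -- IndexError, excluded by Pre_
  | some agent_id =>
    let idx : Int := PySem.Int.mod agent_index (group.length : Int)
    let st := (PySem.List.enumerate group 0).foldl (pvStepB idx) (PySem.Dict.empty, 0)
    if st.1.getD agent_id 0 ≤ 1 then agent_id
    else agent_id ++ "[" ++ PySem.Int.toStr st.2 ++ "]"

-- ===== PRECONDITION & SPEC =====
-- A raises IndexError on an out-of-range index: exactly those inputs are excluded.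
def Pre_agent_instance_label_py (group : List String) (agent_index : Int) : Prop :=
  -(group.length : Int) ≤ agent_index ∧ agent_index < group.length
instance (group : List String) (agent_index : Int) : Decidable (Pre_agent_instance_label_py group agent_index) := by unfold Pre_agent_instance_label_py; infer_instance

def pvWitness_agent_instance_label_py : List String × Int := (["a", "b", "a"], 2)

-- On agent_index = -1 when the last element occurs more than once, A's prefix slice
-- group[:agent_index+1] = group[:0] is empty so A returns the accidental 'id[0]',
-- while B returns the intended 1-based ordinal 'id[total]' (consistent with A's own
-- behaviour at every other negative index).
def D_agent_instance_label_py (group : List String) (agent_index : Int) : Prop :=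
  agent_index = -1 ∧ 1 < group.count (group.getLastD "")
instance (group : List String) (agent_index : Int) : Decidable (D_agent_instance_label_py group agent_index) := by unfold D_agent_instance_label_py; infer_instance

def Spec_agent_instance_label_py (group : List String) (agent_index : Int) (out : String) : Prop := ¬ D_agent_instance_label_py group agent_index → out = agent_instance_label_py_alt group agent_index
instance (group : List String) (agent_index : Int) (out : String) : Decidable (Spec_agent_instance_label_py group agent_index out) := by unfold Spec_agent_instance_label_py; infer_instance

def pvDiffWitness_agent_instance_label_py : List String × Int := (["x", "x"], -1)
def pvDiffWitnessOut_agent_instance_label_py : String × String := ("x[0]", "x[2]")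

-- ===== CLAIM (what is proved, stated in full; the proofs are below) =====
def Claim_unchanged_agent_instance_label_py : Prop := ∀ (group : List String) (agent_index : Int), Dom_agent_instance_label_py group agent_index → Pre_agent_instance_label_py group agent_index → Spec_agent_instance_label_py group agent_index (agent_instance_label_py group agent_index)
def Claim_changed_agent_instance_label_py : Prop := Dom_agent_instance_label_py (pvDiffWitness_agent_instance_label_py.1) (pvDiffWitness_agent_instance_label_py.2) ∧ Pre_agent_instance_label_py (pvDiffWitness_agent_instance_label_py.1) (pvDiffWitness_agent_instance_label_py.2) ∧ D_agent_instance_label_py (pvDiffWitness_agent_instance_label_py.1) (pvDiffWitness_agent_instance_label_py.2) ∧ agent_instance_label_py (pvDiffWitness_agent_instance_label_py.1) (pvDiffWitness_agent_instance_label_py.2) = pvDiffWitnessOut_agent_instance_label_py.1 ∧ agent_instance_label_py_alt (pvDiffWitness_agent_instance_label_py.1) (pvDiffWitness_agent_instance_label_py.2) = pvDiffWitnessOut_agent_instance_label_py.2 ∧ pvDiffWitnessOut_agent_instance_label_py.1 ≠ pvDiffWitnessOut_agent_instance_label_py.2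
def Claim_exact_agent_instance_label_py : Prop := ∀ (group : List String) (agent_index : Int), Dom_agent_instance_label_py group agent_index → Pre_agent_instance_label_py group agent_index → D_agent_instance_label_py group agent_index → agent_instance_label_py group agent_index ≠ agent_instance_label_py_alt group agent_index

-- ===== LEMMAS AND PROOFS =====


theorem pv_core_step (b f n : Nat) (ds : List Char) : Nat.toDigitsCore b (f+1) n ds =
    (if n / b = 0 then (n % b).digitChar :: ds
     else Nat.toDigitsCore b f (n / b) ((n % b).digitChar :: ds)) := by
  rw [Nat.toDigitsCore]

theorem pv_core_suffix (b : Nat) :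
    ∀ (fuel n : Nat) (ds : List Char), ∃ pre, pre ≠ [] ∧
      Nat.toDigitsCore b (fuel + 1) n ds = pre ++ ds := by
  intro fuel
  induction fuel with
  | zero =>
    intro n ds
    refine ⟨[Nat.digitChar (n % b)], by simp, ?_⟩
    rw [pv_core_step]
    split
    · rfl
    · rw [Nat.toDigitsCore]
      rfl
  | succ f ih =>
    intro n ds
    rw [pv_core_step]
    by_cases h : n / b = 0
    · exact ⟨[Nat.digitChar (n % b)], by simp, by rw [if_pos h]; rfl⟩
    · obtain ⟨pre, hpre, heq⟩ := ih (n / b) (Nat.digitChar (n % b) :: ds)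
      exact ⟨pre ++ [Nat.digitChar (n % b)], by simp, by rw [if_neg h, heq]; simp⟩

theorem pv_toDigits_ne_zero (n : Nat) (h : 1 ≤ n) : Nat.toDigits 10 n ≠ ['0'] := by
  rw [Nat.toDigits]
  by_cases h10 : n < 10
  · rw [pv_core_step, if_pos (Nat.div_eq_of_lt h10)]
    interval_cases n <;> decide
  · have h2 : ¬ n / 10 = 0 := by omega
    rw [pv_core_step, if_neg h2]
    obtain ⟨pre, hpre, heq⟩ := pv_core_suffix 10 (n - 1) (n / 10) [Nat.digitChar (n % 10)]
    rw [Nat.sub_add_cancel (by omega : 1 ≤ n)] at heq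
    rw [heq]
    intro hc
    have := congrArg List.length hc
    simp at this
    cases pre with
    | nil => exact hpre rfl
    | cons a l => simp at this

theorem pv_toChars_ne (c : Int) (h : 2 ≤ c) : PySem.Int.toChars c ≠ PySem.Int.toChars 0 := by
  have h0 : PySem.Int.toChars 0 = ['0'] := by decide
  rw [h0, PySem.Int.toChars, if_neg (by omega)]
  exact pv_toDigits_ne_zero c.toNat (by omega)

-- first component of B's loop state: the running-count dictionary counts the ids seen.
theorem pv_fold_fst (idx : Int) :
    ∀ (l : List (Int × String)) (d : PySem.Dict String Int) (c : Int) (v : String),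
      (l.foldl (pvStepB idx) (d, c)).1.getD v 0 = d.getD v 0 + ((l.map (·.2)).count v : Int) := by
  intro l
  induction l with
  | nil => intro d c v; simp
  | cons p l ih =>
    intro d c v
    simp only [List.foldl_cons, List.map_cons]
    rw [pvStepB]
    simp only
    rw [ih]
    rw [PySem.Dict.getD_insert]
    by_cases h : v = p.2
    · subst h
      simp [List.count_cons_self]
      ring
    · have : (p.2 == v) = false := by simpa using fun hh => h hh.symm
      simp [h, List.count_cons, this]

theorem pv_fold_snd_out (idx : Int) :
    ∀ (g : List String) (s : Int) (d : PySem.Dict String Int) (c : Int), idx < s →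
      ((PySem.List.enumerate g s).foldl (pvStepB idx) (d, c)).2 = c := by
  intro g
  induction g with
  | nil => intro s d c _; simp [PySem.List.enumerate_nil]
  | cons x g ih =>
    intro s d c h
    rw [PySem.List.enumerate_cons]
    simp only [List.foldl_cons]
    rw [pvStepB]
    simp only
    have hne : (s == idx) = false := by simp; omega
    rw [hne]
    simp only [Bool.false_eq_true, if_false]
    exact ih (s + 1) _ c (by omega)

theorem pv_fold_snd_in (idx : Int) :
    ∀ (g : List String) (s : Int) (d : PySem.Dict String Int) (c : Int) (n : Nat)
      (hn : n < g.length), idx = s + (n : Int) →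
      ((PySem.List.enumerate g s).foldl (pvStepB idx) (d, c)).2
        = d.getD g[n] 0 + (((g.take (n + 1)).count g[n] : Nat) : Int) := by
  intro g
  induction g with
  | nil => intro s d c n hn; simp at hn
  | cons x g ih =>
    intro s d c n hn hidx
    rw [PySem.List.enumerate_cons]
    simp only [List.foldl_cons]
    rw [pvStepB]
    simp only
    cases n with
    | zero =>
      have heq : (s == idx) = true := by simp; omega
      rw [heq]
      simp only [if_true]
      rw [pv_fold_snd_out idx g (s+1) _ _ (by omega)]
      rw [PySem.Dict.getD_insert_self]
      simp
    | succ m =>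
      have hne : (s == idx) = false := by simp; omega
      rw [hne]
      simp only [Bool.false_eq_true, if_false]
      have hm : m < g.length := by simpa using hn
      rw [ih (s+1) _ c m hm (by omega)]
      simp only [List.getElem_cons_succ]
      rw [PySem.Dict.getD_insert]
      rw [List.take_succ_cons]
      by_cases h : g[m] = x
      · rw [if_pos h, ← h, List.count_cons_self]
        push_cast; ring
      · rw [if_neg h, List.count_cons_of_ne (fun hh => h hh.symm)]

-- A = B on every in-range index outside the change region.
theorem pv_main (group : List String) (a : Int)
    (hlo : -(group.length : Int) ≤ a) (hlt : a < group.length)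
    (hnd : ¬ D_agent_instance_label_py group a) :
    agent_instance_label_py group a = agent_instance_label_py_alt group a := by
  have hlen : 0 < group.length := by omega
  have hb : (0 : Int) < group.length := by exact_mod_cast hlen
  have hmod0 : PySem.Int.mod a (group.length : Int) = a.emod (group.length : Int) :=
    PySem.Int.mod_eq_emod_of_pos hb
  have hemod : a.emod (group.length : Int) = if 0 ≤ a then a else a + group.length := by
    by_cases h0 : 0 ≤ a
    · rw [if_pos h0]; exact Int.emod_eq_of_lt h0 hlt
    · rw [if_neg h0]
      have h2 : (a + (group.length : Int)).emod (group.length : Int)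
          = a.emod (group.length : Int) := Int.add_emod_right a (group.length : Int)
      rw [← h2]
      exact Int.emod_eq_of_lt (by omega) (by omega)
  set na : Int := if 0 ≤ a then a else a + group.length with hna
  have hna0 : 0 ≤ na := by rw [hna]; split <;> omega
  have hnalt : na < (group.length : Int) := by rw [hna]; split <;> omega
  set n : Nat := na.toNat with hndef
  have hnEq : (n : Int) = na := Int.toNat_of_nonneg hna0
  have hn : n < group.length := by omega
  have hmod : PySem.Int.mod a (group.length : Int) = (n : Int) := by
    rw [hmod0, hemod]
    exact hnEq.symm
  have hget : PySem.List.pyGet? group a = some group[n] := by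
    by_cases h0 : 0 ≤ a
    · have hnaa : na = a := by rw [hna, if_pos h0]
      have hid : a = (n : Int) := by omega
      rw [hid, PySem.List.pyGet?_natCast, List.getElem?_eq_getElem hn]
    · set k : Nat := (-a).toNat with hk
      have hak : a = -(k : Int) := by omega
      rw [hak, PySem.List.pyGet?_neg_natCast group k (by omega) (by omega)]
      have hlk : group.length - k = n := by omega
      rw [hlk, List.getElem?_eq_getElem hn]
  -- evaluate both ports
  unfold agent_instance_label_py agent_instance_label_py_alt
  rw [hget]
  simp only [hmod]
  have hB1 : (((PySem.List.enumerate group 0).foldl (pvStepB (n : Int))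
      (PySem.Dict.empty, 0)).1).getD group[n] 0 = (group.count group[n] : Int) := by
    rw [pv_fold_fst]
    simp [PySem.List.map_snd_enumerate]
  have hB2 : (((PySem.List.enumerate group 0).foldl (pvStepB (n : Int))
      (PySem.Dict.empty, 0)).2) = (((group.take (n + 1)).count group[n] : Nat) : Int) := by
    rw [pv_fold_snd_in (n : Int) group 0 _ 0 n hn (by ring)]
    simp
  have hA1 : group.foldl
      (fun acc candidate => if candidate == group[n] then acc + 1 else acc) 0
      = (group.count group[n] : Int) := by
    simpa using PySem.List.foldl_beq_add_one (l := group) (v := group[n]) (a := 0)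
  simp only [hB1, hB2, hA1]
  by_cases hc : (group.count group[n] : Int) ≤ 1
  · rw [if_pos hc, if_pos hc]
  · rw [if_neg hc, if_neg hc]
    have hslice : PySem.List.slice group none (some (a + 1)) = group.take (n + 1) := by
      by_cases h0 : 0 ≤ a
      · have : a + 1 = ((n + 1 : Nat) : Int) := by push_cast; omega
        rw [this, PySem.List.slice_to_natCast]
      · have hane : a ≠ -1 := by
          intro hm1
          apply hnd
          refine ⟨hm1, ?_⟩
          have hlast : group.getLastD "" = group[n] := by
            have h1 : group[n]? = some group[n] := List.getElem?_eq_getElem hn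
            have h2 : group[n]? = group.getLast? := by
              rw [List.getLast?_eq_getElem?]
              congr 1
              omega
            rw [List.getLastD_eq_getLast?, ← h2, h1, Option.getD_some]
          rw [hlast]
          omega
        set k : Nat := (-(a + 1)).toNat with hk
        have hak : a + 1 = -(k : Int) := by omega
        rw [hak, PySem.List.slice_to_neg_natCast group k (by omega)]
        congr 1
        omega
    rw [hslice]
    have hA2 : (group.take (n + 1)).foldl
        (fun acc candidate => if candidate == group[n] then acc + 1 else acc) 0
        = (((group.take (n + 1)).count group[n] : Nat) : Int) := by
      simpa using PySem.List.foldl_beq_add_one (l := group.take (n + 1)) (v := group[n]) (a := 0)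
    rw [hA2]


-- A ≠ B everywhere inside the change region.
theorem pv_tight (group : List String) (a : Int)
    (hlo : -(group.length : Int) ≤ a) (hlt : a < group.length)
    (hd : D_agent_instance_label_py group a) :
    agent_instance_label_py group a ≠ agent_instance_label_py_alt group a := by
  obtain ⟨hm1, hcnt⟩ := hd
  subst hm1
  have hlen : 0 < group.length := by omega
  set n : Nat := group.length - 1 with hndef
  have hn : n < group.length := by omega
  have hlast : group.getLastD "" = group[n] := by
    have h1 : group[n]? = some group[n] := List.getElem?_eq_getElem hn
    have h2 : group[n]? = group.getLast? := by
      rw [List.getLast?_eq_getElem?]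
    rw [List.getLastD_eq_getLast?, ← h2, h1, Option.getD_some]
  rw [hlast] at hcnt
  have hget : PySem.List.pyGet? group (-1) = some group[n] := by
    rw [PySem.List.pyGet?_neg_one, List.getLast?_eq_getElem?]
    exact List.getElem?_eq_getElem hn
  have hmod : PySem.Int.mod (-1) (group.length : Int) = (n : Int) := by
    rw [PySem.Int.mod_eq_emod_of_pos (by exact_mod_cast hlen)]
    have h2 : (-1 : Int) % (group.length : Int)
        = ((-1 : Int) + (group.length : Int)) % (group.length : Int) :=
      (Int.add_emod_right (-1) (group.length : Int)).symm
    rw [h2, Int.emod_eq_of_lt (by omega) (by omega)]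
    omega
  unfold agent_instance_label_py agent_instance_label_py_alt
  rw [hget]
  simp only [hmod]
  have hB1 : (((PySem.List.enumerate group 0).foldl (pvStepB (n : Int))
      (PySem.Dict.empty, 0)).1).getD group[n] 0 = (group.count group[n] : Int) := by
    rw [pv_fold_fst]
    simp [PySem.List.map_snd_enumerate]
  have hB2 : (((PySem.List.enumerate group 0).foldl (pvStepB (n : Int))
      (PySem.Dict.empty, 0)).2) = (group.count group[n] : Int) := by
    rw [pv_fold_snd_in (n : Int) group 0 _ 0 n hn (by ring)]
    have : n + 1 = group.length := by omega
    rw [this, List.take_length]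
    simp
  have hA1 : group.foldl
      (fun acc candidate => if candidate == group[n] then acc + 1 else acc) 0
      = (group.count group[n] : Int) := by
    simpa using PySem.List.foldl_beq_add_one (l := group) (v := group[n]) (a := 0)
  have hA2 : PySem.List.slice group none (some ((-1 : Int) + 1)) = ([] : List String) := by
    have : ((-1 : Int) + 1) = ((0 : Nat) : Int) := by norm_num
    rw [this, PySem.List.slice_to_natCast]
    simp
  simp only [hB1, hB2, hA1, hA2]
  have hc : ¬ ((group.count group[n] : Int) ≤ 1) := by
    simp only [not_le]
    exact_mod_cast hcnt
  rw [if_neg hc, if_neg hc]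
  simp only [List.foldl_nil]
  intro heq
  have hl := congrArg String.toList heq
  simp only [String.toList_append, PySem.Int.toList_toStr] at hl
  have h3 := List.append_cancel_right hl
  have h4 := List.append_cancel_left h3
  exact pv_toChars_ne (group.count group[n] : Int) (by exact_mod_cast hcnt) h4.symm

-- ===== VERDICT (by name: the statement is the Claim_ definition above) =====
theorem agent_instance_label_py_spec : Claim_unchanged_agent_instance_label_py := by
  intro group agent_index _ hpre hnd
  have h := hpre
  unfold Pre_agent_instance_label_py at h
  exact pv_main group agent_index h.1 h.2 hnd
theorem agent_instance_label_py_changed : Claim_changed_agent_instance_label_py := by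
  unfold Claim_changed_agent_instance_label_py; decide
theorem agent_instance_label_py_tight : Claim_exact_agent_instance_label_py := by
  intro group agent_index _ hpre hd
  have h := hpre
  unfold Pre_agent_instance_label_py at h
  exact pv_tight group agent_index h.1 h.2 hd
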